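-- pv_equiv track=rewrite | github.com/AIforimpact22/learnaiforimpact | tests/test_exam_cache.py | _next_prev_uids
-- ===== SOURCE A (Python) =====
-- def _flatten_lessons(structure):
--     items = []
--     for section in structure.get("sections", []):
--         for lesson in section.get("lessons", []):
--             items.append((section, lesson))
--     return items
--
-- def _next_prev_uids(structure, lesson_uid):
--     lessons = [lesson for _, lesson in _flatten_lessons(structure)]
--     ids = [str(lesson.get("lesson_uid")) for lesson in lessons]
--     try:
--         idx = ids.index(str(lesson_uid))
--     except ValueError:
--         return None, None
--     prev_uid = ids[idx - 1] if idx > 0 else None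
--     next_uid = ids[idx + 1] if idx + 1 < len(ids) else None
--     return prev_uid, next_uid
-- ===== SOURCE B (Python) =====
-- def _next_prev_uids(structure, lesson_uid):
--     target = str(lesson_uid)
--     prev = None
--     found = False
--     for section in structure.get("sections", []):
--         for lesson in section.get("lessons", []):
--             uid = str(lesson.get("lesson_uid"))
--             if found:
--                 return prev, uid
--             if uid == target:
--                 found = True
--             else:
--                 prev = uid
--     return (prev, None) if found else (None, None)
-- ===== Notes on version B (the rewrite author's own statement) =====
-- stated objective: alternative
-- what changed: Replaces A's materialised ids list, .index search and index arithmetic by a single early-returning scan over the lessons that carries the previous uid and a found flag.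
import Mathlib
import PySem

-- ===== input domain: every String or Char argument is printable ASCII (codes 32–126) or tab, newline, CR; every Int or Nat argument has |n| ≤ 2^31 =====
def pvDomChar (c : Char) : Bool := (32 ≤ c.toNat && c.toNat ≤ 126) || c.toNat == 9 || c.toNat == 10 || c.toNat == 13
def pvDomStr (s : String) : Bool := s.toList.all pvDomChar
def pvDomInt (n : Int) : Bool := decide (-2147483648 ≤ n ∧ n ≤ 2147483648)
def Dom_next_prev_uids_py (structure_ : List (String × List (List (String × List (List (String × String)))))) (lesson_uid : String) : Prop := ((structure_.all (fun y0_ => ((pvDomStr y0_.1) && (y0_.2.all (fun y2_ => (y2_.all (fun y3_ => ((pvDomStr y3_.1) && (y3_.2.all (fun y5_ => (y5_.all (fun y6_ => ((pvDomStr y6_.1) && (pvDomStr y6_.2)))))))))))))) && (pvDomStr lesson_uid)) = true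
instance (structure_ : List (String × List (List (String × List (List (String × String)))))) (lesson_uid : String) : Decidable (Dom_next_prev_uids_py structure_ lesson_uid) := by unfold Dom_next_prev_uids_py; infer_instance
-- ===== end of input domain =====

-- B replaces A's ids list + .index + index arithmetic by one early-returning scan carrying
-- the previous uid and a found flag (objective: alternative decomposition, same cost).

-- shared primitive: Python dict.get(k, default) on an association list (first match)
def pyDictGetD {β : Type} (d : List (String × β)) (k : String) (dflt : β) : β :=
  match d.find? (fun p => p.1 == k) with
  | some p => p.2
  | none => dflt

-- shared primitive: str(lesson.get("lesson_uid"))  (str(None) = "None")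
def strUid (lesson : List (String × String)) : String :=
  match lesson.find? (fun p => p.1 == "lesson_uid") with
  | some p => p.2
  | none => "None"

-- ===== PORT A =====
-- _flatten_lessons: appends (section, lesson) pairs section by section
def flattenA (sections : List (List (String × List (List (String × String))))) :
    List ((List (String × List (List (String × String)))) × List (String × String)) :=
  sections.foldl
    (fun items sec_ =>
      items ++ (pyDictGetD sec_ "lessons" []).map (fun lesson => (sec_, lesson))) []

def next_prev_uids_py (structure_ : List (String × List (List (String × List (List (String × String)))))) (lesson_uid : String) : Option String × Option String :=
  let lessons := (flattenA (pyDictGetD structure_ "sections" [])).map (·.2)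
  let ids := lessons.map strUid
  match PySem.List.index? ids lesson_uid with
  | none => (none, none)
  | some idx =>
      ((if 0 < idx then PySem.List.pyGet? ids ((idx : Int) - 1) else none),
       (if (idx : Int) + 1 < (ids.length : Int) then PySem.List.pyGet? ids ((idx : Int) + 1) else none))

-- ===== PORT B =====
-- the nested for-loops with early return, over the flattened lesson sequence
def altScan (target : String) (prev : Option String) (found : Bool) :
    List (List (String × String)) → Option String × Option String
  | [] => if found then (prev, none) else (none, none)
  | l :: rest =>
      let uid := strUid l
      if found then (prev, some uid)
      else if uid = target then altScan target prev true rest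
      else altScan target (some uid) false rest

def next_prev_uids_py_alt (structure_ : List (String × List (List (String × List (List (String × String)))))) (lesson_uid : String) : Option String × Option String :=
  altScan lesson_uid none false
    ((pyDictGetD structure_ "sections" []).flatMap (fun sec => pyDictGetD sec "lessons" []))

-- ===== PRECONDITION & SPEC =====
def Spec_next_prev_uids_py (structure_ : List (String × List (List (String × List (List (String × String)))))) (lesson_uid : String) (out : Option String × Option String) : Prop := out = next_prev_uids_py_alt structure_ lesson_uid
instance (structure_ : List (String × List (List (String × List (List (String × String)))))) (lesson_uid : String) (out : Option String × Option String) : Decidable (Spec_next_prev_uids_py structure_ lesson_uid out) := by unfold Spec_next_prev_uids_py; infer_instance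

-- ===== CLAIM (what is proved, stated in full; the proofs are below) =====
def Claim_equal_next_prev_uids_py : Prop := ∀ (structure_ : List (String × List (List (String × List (List (String × String)))))) (lesson_uid : String), Dom_next_prev_uids_py structure_ lesson_uid → Spec_next_prev_uids_py structure_ lesson_uid (next_prev_uids_py structure_ lesson_uid)

-- ===== LEMMAS AND PROOFS =====

-- A's pair-flatten projected to lessons equals B's flatMap
theorem flattenA_aux (sections : List (List (String × List (List (String × String)))))
    (acc : List ((List (String × List (List (String × String)))) × List (String × String))) :
    ((sections.foldl
      (fun items sec_ =>
        items ++ (pyDictGetD sec_ "lessons" []).map (fun lesson => (sec_, lesson))) acc).map (·.2))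
    = acc.map (·.2) ++ sections.flatMap (fun sec => pyDictGetD sec "lessons" []) := by
  induction sections generalizing acc with
  | nil => simp
  | cons s rest ih =>
      rw [List.foldl_cons, ih, List.flatMap_cons, List.map_append, List.map_map]
      simp

theorem flattenA_eq (sections : List (List (String × List (List (String × String))))) :
    (flattenA sections).map (·.2) = sections.flatMap (fun sec => pyDictGetD sec "lessons" []) := by
  rw [flattenA, flattenA_aux]; simp

theorem altScan_found (target : String) (prev : Option String)
    (lessons : List (List (String × String))) :
    altScan target prev true lessons = (prev, (lessons.map strUid).head?) := by
  cases lessons <;> simp [altScan]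

theorem altScan_main (lessons : List (List (String × String))) (u : String) (prev : Option String) :
    altScan u prev false lessons =
      (match PySem.List.index? (lessons.map strUid) u with
       | none => (none, none)
       | some k =>
           ((if 0 < k then PySem.List.pyGet? (lessons.map strUid) ((k : Int) - 1) else prev),
            (if (k : Int) + 1 < ((lessons.map strUid).length : Int)
              then PySem.List.pyGet? (lessons.map strUid) ((k : Int) + 1) else none))) := by
  induction lessons generalizing prev with
  | nil => simp [altScan, PySem.List.index?]
  | cons l rest ih =>
      by_cases h : strUid l = u
      · subst h
        rw [List.map_cons, PySem.List.index?_cons_self]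
        simp only [altScan, Bool.false_eq_true, if_false]
        rw [altScan_found]
        cases rest with
        | nil => simp
        | cons r rs =>
            simp [PySem.List.pyGet?, PySem.List.pyIdx?]
      · rw [List.map_cons, PySem.List.index?_cons_of_ne _ h]
        simp only [altScan, Bool.false_eq_true, if_false, if_neg h]
        rw [ih (some (strUid l))]
        cases hk : PySem.List.index? (rest.map strUid) u with
        | none => simp
        | some k =>
            simp only [Option.map_some, List.length_cons, Prod.mk.injEq]
            refine ⟨?_, ?_⟩
            · cases k with
              | zero =>
                  simp [PySem.List.pyGet?, PySem.List.pyIdx?]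
              | succ k' =>
                  have h1 : ((k' + 1 + 1 : Nat) : Int) - 1 = ((k' : Nat) : Int) + 1 := by
                    push_cast; ring
                  have h2 : ((k' + 1 : Nat) : Int) - 1 = ((k' : Nat) : Int) := by
                    push_cast; ring
                  rw [if_pos (Nat.succ_pos _), if_pos (Nat.succ_pos _), h1, h2,
                    PySem.List.pyGet?_cons_succ]
            · by_cases hc : (k : Int) + 1 < ((rest.map strUid).length : Int)
              · rw [if_pos hc, if_pos (by push_cast; omega)]
                have := PySem.List.pyGet?_cons_succ (strUid l) (rest.map strUid) (k + 1)
                rw [this]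
                push_cast
                ring_nf
              · rw [if_neg hc, if_neg (by push_cast; omega)]

theorem next_prev_uids_py_spec : Claim_equal_next_prev_uids_py := by
  intro s u _
  unfold Spec_next_prev_uids_py next_prev_uids_py next_prev_uids_py_alt
  rw [flattenA_eq, altScan_main]
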